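-- pv_equiv track=rewrite | github.com/JaneChun/algorithm | 프로그래머스/2/42890. 후보키/후보키.py | is_candidate_key
-- ===== SOURCE A (Python) =====
-- def is_candidate_key(combo, relation):
--     row_set = set()
--
--     for rel in relation:
--         acc = ''
--         for col in combo:
--             acc += rel[col]
--
--         if acc in row_set:
--             return False
--
--         row_set.add(acc)
--
--     return True
-- ===== SOURCE B (Python) =====
-- def is_candidate_key(combo, relation):
--     keys = sorted(''.join(rel[col] for col in combo) for rel in relation)
--     return all(x != y for x, y in zip(keys, keys[1:]))
-- ===== Notes on version B (the rewrite author's own statement) =====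
-- stated objective: alternative
-- what changed: B decides uniqueness by sorting the projected row keys and scanning adjacent pairs for an equal neighbour (sort-then-scan), instead of A's hash-set with per-row membership test and early return.
-- outside the precondition, e.g. on is_candidate_key((1,), [['a', 'x'], ['b', 'x'], ['c']]): A returns False, B raises IndexError
import Mathlib
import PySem

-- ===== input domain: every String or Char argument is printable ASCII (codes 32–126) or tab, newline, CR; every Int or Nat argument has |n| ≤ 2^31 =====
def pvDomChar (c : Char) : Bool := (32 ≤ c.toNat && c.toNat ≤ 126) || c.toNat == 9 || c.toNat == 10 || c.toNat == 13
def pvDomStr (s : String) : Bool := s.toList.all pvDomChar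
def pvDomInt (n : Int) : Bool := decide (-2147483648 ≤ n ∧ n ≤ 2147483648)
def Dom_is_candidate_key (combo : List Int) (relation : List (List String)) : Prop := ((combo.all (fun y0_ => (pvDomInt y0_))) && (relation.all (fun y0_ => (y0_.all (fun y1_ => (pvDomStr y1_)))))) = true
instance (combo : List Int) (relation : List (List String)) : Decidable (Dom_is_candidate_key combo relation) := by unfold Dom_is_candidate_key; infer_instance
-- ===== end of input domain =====

-- B sorts the projected row keys and scans adjacent pairs for an equal neighbour,
-- replacing A's hash-set with per-row membership test and early return (alternative algorithm).

-- ===== PORT A =====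
-- acc = ''; for col in combo: acc += rel[col]   (strings carried as List Char; PySem strings are exact on them)
def pvKeyA (combo : List Int) (rel : List String) : List Char :=
  combo.foldl (fun a col => a ++ (PySem.List.pyGetD rel col "").toList) []

def pvLoopA (combo : List Int) (rows : List (List String)) (rowSet : PySem.Set (List Char)) : Bool :=
  match rows with
  | [] => true
  | rel :: rest =>
    let acc := pvKeyA combo rel
    if PySem.Set.contains rowSet acc then false
    else pvLoopA combo rest (PySem.Set.add rowSet acc)

def is_candidate_key (combo : List Int) (relation : List (List String)) : Bool :=
  pvLoopA combo relation PySem.Set.empty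

-- ===== PORT B =====
-- keys = sorted(''.join(rel[col] for col in combo) for rel in relation)
-- return all(x != y for x, y in zip(keys, keys[1:]))
def is_candidate_key_alt (combo : List Int) (relation : List (List String)) : Bool :=
  let keys := PySem.List.sorted
    (relation.map (fun rel =>
      String.ofList (PySem.Chars.join [] (combo.map (fun col => (PySem.List.pyGetD rel col "").toList)))))
    (fun x => x) false
  (keys.zip keys.tail).all (fun p => p.1 != p.2)

-- ===== PRECONDITION & SPEC =====
-- Pre_ excludes inputs where some column index in combo is out of range for some row: Python A
-- raises IndexError there unless a duplicate key before the bad row makes it return False early;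
-- B's natural code raises IndexError on all such inputs (it projects every row first).
def Pre_is_candidate_key (combo : List Int) (relation : List (List String)) : Prop :=
  ∀ rel ∈ relation, ∀ col ∈ combo, PySem.Raise.InRange rel.length col
instance (combo : List Int) (relation : List (List String)) : Decidable (Pre_is_candidate_key combo relation) := by unfold Pre_is_candidate_key; infer_instance

def pvWitness_is_candidate_key : List Int × List (List String) :=
  ([0, 1], [["a", "x"], ["b", "x"]])

def Spec_is_candidate_key (combo : List Int) (relation : List (List String)) (out : Bool) : Prop := out = is_candidate_key_alt combo relation
instance (combo : List Int) (relation : List (List String)) (out : Bool) : Decidable (Spec_is_candidate_key combo relation out) := by unfold Spec_is_candidate_key; infer_instance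

-- ===== CLAIM (what is proved, stated in full; the proofs are below) =====
def Claim_equal_is_candidate_key : Prop := ∀ (combo : List Int) (relation : List (List String)), Dom_is_candidate_key combo relation → Pre_is_candidate_key combo relation → Spec_is_candidate_key combo relation (is_candidate_key combo relation)

-- ===== LEMMAS AND PROOFS =====

-- ''.join over a list of char-lists is plain left-fold concatenation (A's acc loop).
theorem pvJoin_eq_foldl (ls : List (List Char)) (a : List Char) :
    a ++ PySem.Chars.join [] ls = ls.foldl (fun x y => x ++ y) a := by
  induction ls generalizing a with
  | nil => simp [PySem.Chars.join, List.intercalate]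
  | cons k ks ih =>
    cases ks with
    | nil => simp [PySem.Chars.join, List.intercalate]
    | cons k' ks' =>
      rw [PySem.Chars.join_cons_cons]
      have h := ih (a ++ k)
      simp only [List.foldl_cons] at h ⊢
      simpa [List.append_assoc] using h

theorem pvKeyA_eq_join (combo : List Int) (rel : List String) :
    PySem.Chars.join [] (combo.map (fun col => (PySem.List.pyGetD rel col "").toList))
      = pvKeyA combo rel := by
  have h := pvJoin_eq_foldl (combo.map (fun col => (PySem.List.pyGetD rel col "").toList)) []
  simpa [pvKeyA, List.foldl_map] using h

-- Loop invariant for A: true iff the remaining keys are pairwise distinct and miss the seen set.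
theorem pvLoopA_true_iff (combo : List Int) (rows : List (List String))
    (seen : PySem.Set (List Char)) :
    pvLoopA combo rows seen = true ↔
      (rows.map (pvKeyA combo)).Nodup ∧ ∀ k ∈ rows.map (pvKeyA combo), k ∉ seen := by
  induction rows generalizing seen with
  | nil => simp [pvLoopA]
  | cons rel rest ih =>
    simp only [pvLoopA, List.map_cons, List.nodup_cons, List.mem_cons]
    by_cases hmem : pvKeyA combo rel ∈ seen
    · simp only [(PySem.Set.contains_iff seen _).mpr hmem] at *
      simp only [if_true]
      constructor
      · intro h; exact absurd h (by simp)
      · rintro ⟨-, hall⟩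
        exact absurd hmem (hall _ (Or.inl rfl))
    · have hc : PySem.Set.contains seen (pvKeyA combo rel) = false := by
        rcases h : PySem.Set.contains seen (pvKeyA combo rel) with _ | _
        · rfl
        · exact absurd ((PySem.Set.contains_iff seen _).mp h) hmem
      simp only [hc, Bool.false_eq_true, if_false]
      rw [ih]
      constructor
      · rintro ⟨hnd, hall⟩
        have hnotk : pvKeyA combo rel ∉ rest.map (pvKeyA combo) := by
          intro hk
          have := hall _ hk
          rw [PySem.Set.mem_add] at this
          exact this (Or.inr rfl)
        refine ⟨⟨hnotk, hnd⟩, ?_⟩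
        rintro k (rfl | hk)
        · exact hmem
        · intro hks
          exact (hall _ hk) ((PySem.Set.mem_add seen _ _).mpr (Or.inl hks))
      · rintro ⟨⟨hnotk, hnd⟩, hall⟩
        refine ⟨hnd, ?_⟩
        intro k hk hks
        rw [PySem.Set.mem_add] at hks
        rcases hks with h | rfl
        · exact hall _ (Or.inr hk) h
        · exact hnotk hk

-- On a ≤-sorted list, "no equal adjacent pair" is exactly Nodup.
theorem pvZipAll_iff_nodup (S : List String) (hs : S.Pairwise (· ≤ ·)) :
    ((S.zip S.tail).all (fun p => p.1 != p.2) = true) ↔ S.Nodup := by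
  induction S with
  | nil => simp
  | cons x t ih =>
    cases t with
    | nil => simp
    | cons y t' =>
      have hxy : x ≤ y := (List.pairwise_cons.mp hs).1 y (List.mem_cons_self)
      have hs' : (y :: t').Pairwise (· ≤ ·) := (List.pairwise_cons.mp hs).2
      simp only [List.tail_cons, List.zip_cons_cons, List.all_cons, Bool.and_eq_true,
        bne_iff_ne, ne_eq, List.nodup_cons]
      have ih' := ih hs'
      simp only [List.tail_cons] at ih'
      rw [ih', List.nodup_cons]
      constructor
      · rintro ⟨hne, hny, hnd⟩
        refine ⟨?_, hny, hnd⟩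
        intro hx
        rcases List.mem_cons.mp hx with hx | hx
        · exact hne hx
        · -- x ∈ t', but x ≤ y ≤ every element of t' and x ≠ y; so x = that element forces y ≤ x
          have hy : y ≤ x := (List.pairwise_cons.mp hs').1 x hx
          exact hne (le_antisymm hxy hy)
      · rintro ⟨hnx, hny, hnd⟩
        exact ⟨fun h => hnx (h ▸ List.mem_cons_self), hny, hnd⟩

theorem pvStringMk_inj : Function.Injective String.ofList := by
  intro a b h
  simpa using congrArg String.toList h

-- ===== VERDICT (by name: the statement is the Claim_ definition above) =====
theorem is_candidate_key_spec : Claim_equal_is_candidate_key := by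
  intro combo relation _ _
  unfold Spec_is_candidate_key is_candidate_key is_candidate_key_alt
  simp only [pvKeyA_eq_join]
  set L : List String := relation.map (fun rel => String.ofList (pvKeyA combo rel)) with hL
  set S := PySem.List.sorted L (fun x => x) false with hS
  rw [Bool.eq_iff_iff, pvLoopA_true_iff,
    pvZipAll_iff_nodup S (by simpa using PySem.List.sorted_pairwise L (fun x => x))]
  have hperm : S.Perm L := PySem.List.sorted_perm L (fun x => x) false
  rw [hperm.nodup_iff]
  have : L = (relation.map (pvKeyA combo)).map String.ofList := by simp [hL, List.map_map]
  rw [this, List.nodup_map_iff pvStringMk_inj]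
  simp [PySem.Set.empty]
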